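-- pv_equiv track=rewrite | github.com/Rudrajiii/Python__Gallery | tempCodeRunnerFile.py | tspeak
-- ===== SOURCE A (Python) =====
-- def tspeak(inputText):
--     ledger = {
--         'a': '6',
--         'b': 'p',
--         'c': '&',
--         'd': '+',
--         'e': '=',
--         'f': '_',
--         'g': '-',
--         'h': ')',
--         'i': '(',
--         'j': '"',
--         'k': '#',
--         'l': '@',
--         'm': '!',
--         'n': '~',
--         'o': '`',
--         'p': '*',
--         'q': '^',
--         'r': '%',
--         's': '$',
--         't': '/',
--         'u': ']',
--         'v': '[',
--         'w': '?',
--         'x': '<',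
--         'y': '>',
--         'z': '::'
--     }
--
--     # Create a reverse lookup dictionary
--     reverse_ledger = {}
--     for key, value in ledger.items():
--         if value not in reverse_ledger:
--             reverse_ledger[value] = [key]
--         else:
--             reverse_ledger[value].append(key)
--
--     outputText = ''
--     i = 0
--     while i < len(inputText):
--         found = False
--         for value, chars in reverse_ledger.items():
--             if inputText.startswith(value, i):
--                 outputText += chars[0]
--                 i += len(value)
--                 found = True
--                 break
--         if not found:
--             outputText += inputText[i]
--             i += 1
--
--     return outputText
-- ===== SOURCE B (Python) =====
-- def tspeak(inputText):
--     # Decode in two staged passes: collapse the one multi-char code '::' to 'z',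
--     # then undo all single-character substitutions at once with str.translate.
--     # Safe because '::'->'z' cannot create or destroy any encoded character
--     # ('z' and ':' are not translate keys), so the stages are independent.
--     table = str.maketrans('6p&+=_-)("#@!~`*^%$/][?<>',
--                           'abcdefghijklmnopqrstuvwxy')
--     return inputText.replace('::', 'z').translate(table)
-- ===== Notes on version B (the rewrite author's own statement) =====
-- stated objective: faster
-- what changed: A's positional while-loop that at each index scans a reverse-lookup dict with startswith is replaced by two staged whole-string passes: one replace('::','z') followed by a single str.translate with a 25-character transposition table; no index, no reverse dict, no per-character interpreted loop.
import Mathlib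
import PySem

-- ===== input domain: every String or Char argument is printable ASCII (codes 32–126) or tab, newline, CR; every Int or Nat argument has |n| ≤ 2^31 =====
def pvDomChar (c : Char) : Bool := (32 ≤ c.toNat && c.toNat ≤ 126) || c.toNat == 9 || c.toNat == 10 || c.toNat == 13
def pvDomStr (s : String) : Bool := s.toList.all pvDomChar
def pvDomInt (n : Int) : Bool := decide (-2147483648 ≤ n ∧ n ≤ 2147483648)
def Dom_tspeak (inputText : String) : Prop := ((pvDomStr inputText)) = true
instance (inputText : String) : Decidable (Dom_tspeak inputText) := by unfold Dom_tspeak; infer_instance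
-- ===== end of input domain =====

-- B replaces A's indexed while-loop with its startswith scan over a reverse dict by two staged
-- whole-string passes: replace('::','z') then one str.translate over a 25-char table
-- (objective: faster -- built-in passes instead of an interpreted per-character loop).

-- ===== PORT A =====
-- the ledger dict literal
def tspeakItems : List (String × String) := [("a", "6"), ("b", "p"), ("c", "&"), ("d", "+"), ("e", "="), ("f", "_"), ("g", "-"), ("h", ")"), ("i", "("), ("j", "\""), ("k", "#"), ("l", "@"), ("m", "!"), ("n", "~"), ("o", "`"), ("p", "*"), ("q", "^"), ("r", "%"), ("s", "$"), ("t", "/"), ("u", "]"), ("v", "["), ("w", "?"), ("x", "<"), ("y", ">"), ("z", "::")]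

def tspeakLedger : PySem.Dict String String := PySem.Dict.mk tspeakItems

-- reverse_ledger: foldl over ledger.items() with the 'value not in reverse_ledger' test
def tspeakRev : PySem.Dict String (List String) :=
  tspeakLedger.items.foldl
    (fun d kv => if d.contains kv.2 = false then d.insert kv.2 [kv.1]
                 else d.modify kv.2 [] (fun l => l ++ [kv.1]))
    PySem.Dict.empty

-- the inner 'for value, chars in reverse_ledger.items(): if inputText.startswith(value, i): ... break'
-- (inputText.startswith(value, i) = value is a prefix of the remaining suffix of the input at i)
def tspeakFind : List (String × List String) → List Char → Option (String × List String)
  | [], _ => none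
  | (v, chars) :: rest, s =>
      if PySem.Chars.startswith s v.toList = true then some (v, chars) else tspeakFind rest s

-- the while loop; fuel = |inputText| bounds the iteration count (i strictly increases each pass),
-- so the fuel guard only makes the very same computation structurally recursive.  chars.headD ""
-- is Python's chars[0]: every list stored in reverse_ledger is nonempty (created as [key]).
def tspeakLoop : Nat → List Char → List Char → List Char
  | 0, _, out => out
  | fuel+1, rest, out =>
    if rest.isEmpty = true then out
    else
      match tspeakFind tspeakRev.items rest with
      | some (v, chars) => tspeakLoop fuel (rest.drop v.toList.length) (out ++ (chars.headD "").toList)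
      | none => tspeakLoop fuel (rest.drop 1) (out ++ rest.take 1)

def tspeak (inputText : String) : String :=
  String.mk (tspeakLoop inputText.toList.length inputText.toList [])

-- ===== PORT B =====
-- Source B's str.maketrans table, as the zip of its two character-string arguments
def altTable : List (Char × Char) :=
  "6p&+=_-)(\"#@!~`*^%$/][?<>".toList.zip "abcdefghijklmnopqrstuvwxy".toList

-- str.translate: per-character table lookup, identity where the table has no entry
-- (hand port; exact for this table: all keys are single BMP chars, values single chars)
def altTranslate (t : List (Char × Char)) (c : Char) : Char :=
  match t.find? (fun p => p.1 == c) with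
  | some p => p.2
  | none => c

-- Source B: return inputText.replace('::', 'z').translate(table)
def tspeak_alt (inputText : String) : String :=
  String.mk ((PySem.Chars.replace inputText.toList "::".toList "z".toList).map
    (altTranslate altTable))

-- ===== PRECONDITION & SPEC =====
def Spec_tspeak (inputText : String) (out : String) : Prop := out = tspeak_alt inputText
instance (inputText : String) (out : String) : Decidable (Spec_tspeak inputText out) := by unfold Spec_tspeak; infer_instance

-- ===== CLAIM (what is proved, stated in full; the proofs are below) =====
def Claim_equal_tspeak : Prop := ∀ (inputText : String), Dom_tspeak inputText → Spec_tspeak inputText (tspeak inputText)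

-- ===== LEMMAS AND PROOFS =====

-- the per-character decode map
def gmap (c : Char) : Char :=
  if c = '6' then 'a' else
  if c = 'p' then 'b' else
  if c = '&' then 'c' else
  if c = '+' then 'd' else
  if c = '=' then 'e' else
  if c = '_' then 'f' else
  if c = '-' then 'g' else
  if c = ')' then 'h' else
  if c = '(' then 'i' else
  if c = '\"' then 'j' else
  if c = '#' then 'k' else
  if c = '@' then 'l' else
  if c = '!' then 'm' else
  if c = '~' then 'n' else
  if c = '`' then 'o' else
  if c = '*' then 'p' else
  if c = '^' then 'q' else
  if c = '%' then 'r' else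
  if c = '$' then 's' else
  if c = '/' then 't' else
  if c = ']' then 'u' else
  if c = '[' then 'v' else
  if c = '?' then 'w' else
  if c = '<' then 'x' else
  if c = '>' then 'y' else
  c

-- the '::' -> 'z' left-to-right non-overlapping replacement, as a scan
def repC : List Char → List Char
  | [] => []
  | [c] => [c]
  | c1 :: c2 :: t => if c1 = ':' ∧ c2 = ':' then 'z' :: repC t else c1 :: repC (c2 :: t)

lemma repC_cons (c : Char) (t : List Char) (h : ¬(c = ':' ∧ t.head? = some ':')) :
    repC (c :: t) = c :: repC t := by
  cases t with
  | nil => rfl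
  | cons c2 t2 =>
      rw [repC, if_neg]
      rintro ⟨hc, hc2⟩
      exact h ⟨hc, by simp [hc2]⟩

lemma gmap_colon_iff (c : Char) : gmap c = ':' ↔ c = ':' := by
  by_cases h1 : c = '6'
  · subst h1; decide
  by_cases h2 : c = 'p'
  · subst h2; decide
  by_cases h3 : c = '&'
  · subst h3; decide
  by_cases h4 : c = '+'
  · subst h4; decide
  by_cases h5 : c = '='
  · subst h5; decide
  by_cases h6 : c = '_'
  · subst h6; decide
  by_cases h7 : c = '-'
  · subst h7; decide
  by_cases h8 : c = ')'
  · subst h8; decide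
  by_cases h9 : c = '('
  · subst h9; decide
  by_cases h10 : c = '\"'
  · subst h10; decide
  by_cases h11 : c = '#'
  · subst h11; decide
  by_cases h12 : c = '@'
  · subst h12; decide
  by_cases h13 : c = '!'
  · subst h13; decide
  by_cases h14 : c = '~'
  · subst h14; decide
  by_cases h15 : c = '`'
  · subst h15; decide
  by_cases h16 : c = '*'
  · subst h16; decide
  by_cases h17 : c = '^'
  · subst h17; decide
  by_cases h18 : c = '%'
  · subst h18; decide
  by_cases h19 : c = '$'
  · subst h19; decide
  by_cases h20 : c = '/'
  · subst h20; decide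
  by_cases h21 : c = ']'
  · subst h21; decide
  by_cases h22 : c = '['
  · subst h22; decide
  by_cases h23 : c = '?'
  · subst h23; decide
  by_cases h24 : c = '<'
  · subst h24; decide
  by_cases h25 : c = '>'
  · subst h25; decide
  simp [gmap, h1, h2, h3, h4, h5, h6, h7, h8, h9, h10, h11, h12, h13, h14, h15, h16, h17, h18, h19, h20, h21, h22, h23, h24, h25]

-- B's translate step equals gmap pointwise
lemma translate_eq_gmap (c : Char) : altTranslate altTable c = gmap c := by
  by_cases h1 : c = '6'
  · subst h1; decide
  by_cases h2 : c = 'p'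
  · subst h2; decide
  by_cases h3 : c = '&'
  · subst h3; decide
  by_cases h4 : c = '+'
  · subst h4; decide
  by_cases h5 : c = '='
  · subst h5; decide
  by_cases h6 : c = '_'
  · subst h6; decide
  by_cases h7 : c = '-'
  · subst h7; decide
  by_cases h8 : c = ')'
  · subst h8; decide
  by_cases h9 : c = '('
  · subst h9; decide
  by_cases h10 : c = '\"'
  · subst h10; decide
  by_cases h11 : c = '#'
  · subst h11; decide
  by_cases h12 : c = '@'
  · subst h12; decide
  by_cases h13 : c = '!'
  · subst h13; decide
  by_cases h14 : c = '~'
  · subst h14; decide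
  by_cases h15 : c = '`'
  · subst h15; decide
  by_cases h16 : c = '*'
  · subst h16; decide
  by_cases h17 : c = '^'
  · subst h17; decide
  by_cases h18 : c = '%'
  · subst h18; decide
  by_cases h19 : c = '$'
  · subst h19; decide
  by_cases h20 : c = '/'
  · subst h20; decide
  by_cases h21 : c = ']'
  · subst h21; decide
  by_cases h22 : c = '['
  · subst h22; decide
  by_cases h23 : c = '?'
  · subst h23; decide
  by_cases h24 : c = '<'
  · subst h24; decide
  by_cases h25 : c = '>'
  · subst h25; decide
  have hfind : altTable.find? (fun p => p.1 == c) = none := by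
    have ht : altTable = [('6','a'),('p','b'),('&','c'),('+','d'),('=','e'),('_','f'),('-','g'),(')','h'),('(','i'),('\"','j'),('#','k'),('@','l'),('!','m'),('~','n'),('`','o'),('*','p'),('^','q'),('%','r'),('$','s'),('/','t'),(']','u'),('[','v'),('?','w'),('<','x'),('>','y')] := by decide
    rw [ht]
    have e : ∀ x : Char, x ≠ c → (x == c) = false := fun x hx => beq_eq_false_iff_ne.mpr hx
    simp [List.find?, e _ (Ne.symm h1), e _ (Ne.symm h2), e _ (Ne.symm h3), e _ (Ne.symm h4), e _ (Ne.symm h5), e _ (Ne.symm h6), e _ (Ne.symm h7), e _ (Ne.symm h8), e _ (Ne.symm h9), e _ (Ne.symm h10), e _ (Ne.symm h11), e _ (Ne.symm h12), e _ (Ne.symm h13), e _ (Ne.symm h14), e _ (Ne.symm h15), e _ (Ne.symm h16), e _ (Ne.symm h17), e _ (Ne.symm h18), e _ (Ne.symm h19), e _ (Ne.symm h20), e _ (Ne.symm h21), e _ (Ne.symm h22), e _ (Ne.symm h23), e _ (Ne.symm h24), e _ (Ne.symm h25)]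
  simp [altTranslate, hfind, gmap, h1, h2, h3, h4, h5, h6, h7, h8, h9, h10, h11, h12, h13, h14, h15, h16, h17, h18, h19, h20, h21, h22, h23, h24, h25]

-- mapping gmap commutes with the '::' scan (gmap fixes ':' , its ':' preimage is only ':',
-- and gmap 'z' = 'z')
lemma map_gmap_repC (l : List Char) : (repC l).map gmap = repC (l.map gmap) := by
  induction l using repC.induct with
  | case1 => rfl
  | case2 c => rfl
  | case3 c1 c2 t h ih =>
      obtain ⟨h1, h2⟩ := h
      subst h1; subst h2
      have hz : repC (':' :: ':' :: t) = 'z' :: repC t := by rw [repC, if_pos ⟨rfl, rfl⟩]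
      have hg : gmap ':' = ':' := by decide
      have hz' : repC (List.map gmap (':' :: ':' :: t)) = 'z' :: repC (List.map gmap t) := by
        simp only [List.map_cons, hg]
        rw [repC, if_pos ⟨rfl, rfl⟩]
      have hgz : gmap 'z' = 'z' := by decide
      calc (repC (':' :: ':' :: t)).map gmap
          = 'z' :: (repC t).map gmap := by rw [hz]; simp [List.map_cons, hgz]
        _ = 'z' :: repC (List.map gmap t) := by rw [ih]
        _ = repC (List.map gmap (':' :: ':' :: t)) := hz'.symm
  | case4 c1 c2 t h ih =>
      have hnc : repC (c1 :: c2 :: t) = c1 :: repC (c2 :: t) := by rw [repC, if_neg h]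
      have hnc' : repC (List.map gmap (c1 :: c2 :: t))
          = gmap c1 :: repC (List.map gmap (c2 :: t)) := by
        simp only [List.map_cons]
        rw [repC, if_neg]
        rintro ⟨hx1, hx2⟩
        exact h ⟨(gmap_colon_iff c1).mp hx1, (gmap_colon_iff c2).mp hx2⟩
      simp only [hnc, hnc', List.map_cons] at *
      simp [ih]

-- the '::' replacement primitive is exactly the scan repC
lemma colon_go : ∀ (fuel : Nat) (l acc : List Char), l.length ≤ fuel →
    PySem.Chars.replace.go [':', ':'] ['z'] fuel l acc = acc.reverse ++ repC l := by
  intro fuel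
  induction fuel with
  | zero =>
      intro l acc h
      have hl : l = [] := List.eq_nil_of_length_eq_zero (Nat.le_zero.mp h)
      subst hl; simp [PySem.Chars.replace.go, repC]
  | succ n ih =>
      intro l acc h
      cases l with
      | nil => simp [PySem.Chars.replace.go, repC]
      | cons c t =>
          rw [PySem.Chars.replace.go]
          cases t with
          | nil =>
              rw [if_neg (by simp [List.isPrefixOf])]
              have ihh := ih [] (c :: acc) (by simp)
              simp at ihh
              simp [ihh, repC]
          | cons c2 t2 =>
              by_cases hc : c = ':' ∧ c2 = ':'
              · obtain ⟨hc1, hc2⟩ := hc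
                subst hc1; subst hc2
                rw [if_pos (by simp [List.isPrefixOf])]
                have ihh := ih t2 (['z'].reverse ++ acc) (by simp at h ⊢; omega)
                simp at ihh
                simp [ihh, repC]
              · rw [if_neg (by
                  simp [List.isPrefixOf]
                  intro h1 h2
                  exact hc ⟨h1.symm, h2.symm⟩)]
                have ihh := ih (c2 :: t2) (c :: acc) (by simp at h ⊢; omega)
                rw [ihh]
                have hr : repC (c :: c2 :: t2) = c :: repC (c2 :: t2) := by
                  rw [repC, if_neg hc]
                simp [hr]

lemma colon_replace (l : List Char) :
    PySem.Chars.replace l [':', ':'] ['z'] = repC l := by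
  rw [PySem.Chars.replace]
  simp [colon_go l.length l [] (le_refl _)]

lemma rev_items : tspeakRev.items = [("6", ["a"]), ("p", ["b"]), ("&", ["c"]), ("+", ["d"]), ("=", ["e"]), ("_", ["f"]), ("-", ["g"]), (")", ["h"]), ("(", ["i"]), ("\"", ["j"]), ("#", ["k"]), ("@", ["l"]), ("!", ["m"]), ("~", ["n"]), ("`", ["o"]), ("*", ["p"]), ("^", ["q"]), ("%", ["r"]), ("$", ["s"]), ("/", ["t"]), ("]", ["u"]), ("[", ["v"]), ("?", ["w"]), ("<", ["x"]), (">", ["y"]), ("::", ["z"])] := by decide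

lemma loop_some (n : Nat) (rest out : List Char) (v : String) (chars : List String)
    (hf : tspeakFind tspeakRev.items rest = some (v, chars)) (hne : rest.isEmpty = false) :
    tspeakLoop (n+1) rest out
      = tspeakLoop n (rest.drop v.toList.length) (out ++ (chars.headD "").toList) := by
  rw [tspeakLoop, if_neg (by simp [hne]), hf]

lemma loop_none (n : Nat) (rest out : List Char)
    (hf : tspeakFind tspeakRev.items rest = none) (hne : rest.isEmpty = false) :
    tspeakLoop (n+1) rest out = tspeakLoop n (rest.drop 1) (out ++ rest.take 1) := by
  rw [tspeakLoop, if_neg (by simp [hne]), hf]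

lemma loopA : ∀ (fuel : Nat) (l out : List Char), l.length ≤ fuel →
    tspeakLoop fuel l out = out ++ repC (l.map gmap) := by
  intro fuel
  induction fuel with
  | zero =>
      intro l out h
      have hl : l = [] := List.eq_nil_of_length_eq_zero (Nat.le_zero.mp h)
      subst hl; simp [tspeakLoop, repC]
  | succ n ih =>
      intro l out h
      cases l with
      | nil => simp [tspeakLoop, repC]
      | cons c t =>
          have hlen : t.length ≤ n := by simp at h; omega
          by_cases h1 : c = '6'
          · subst h1
            rw [loop_some n _ out "6" ["a"] (by rw [rev_items]; simp [tspeakFind, PySem.Chars.startswith, List.isPrefixOf]) rfl]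
            have hg : gmap '6' = 'a' := by decide
            have hrc : repC ('a' :: List.map gmap t) = 'a' :: repC (List.map gmap t) :=
              repC_cons _ _ (by rintro ⟨hx, -⟩; exact absurd hx (by decide))
            have hih := ih t (out ++ ['a']) hlen
            simp only [List.map_cons, hg, hrc]
            simpa using hih
          by_cases h2 : c = 'p'
          · subst h2
            rw [loop_some n _ out "p" ["b"] (by rw [rev_items]; simp [tspeakFind, PySem.Chars.startswith, List.isPrefixOf]) rfl]
            have hg : gmap 'p' = 'b' := by decide
            have hrc : repC ('b' :: List.map gmap t) = 'b' :: repC (List.map gmap t) :=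
              repC_cons _ _ (by rintro ⟨hx, -⟩; exact absurd hx (by decide))
            have hih := ih t (out ++ ['b']) hlen
            simp only [List.map_cons, hg, hrc]
            simpa using hih
          by_cases h3 : c = '&'
          · subst h3
            rw [loop_some n _ out "&" ["c"] (by rw [rev_items]; simp [tspeakFind, PySem.Chars.startswith, List.isPrefixOf]) rfl]
            have hg : gmap '&' = 'c' := by decide
            have hrc : repC ('c' :: List.map gmap t) = 'c' :: repC (List.map gmap t) :=
              repC_cons _ _ (by rintro ⟨hx, -⟩; exact absurd hx (by decide))
            have hih := ih t (out ++ ['c']) hlen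
            simp only [List.map_cons, hg, hrc]
            simpa using hih
          by_cases h4 : c = '+'
          · subst h4
            rw [loop_some n _ out "+" ["d"] (by rw [rev_items]; simp [tspeakFind, PySem.Chars.startswith, List.isPrefixOf]) rfl]
            have hg : gmap '+' = 'd' := by decide
            have hrc : repC ('d' :: List.map gmap t) = 'd' :: repC (List.map gmap t) :=
              repC_cons _ _ (by rintro ⟨hx, -⟩; exact absurd hx (by decide))
            have hih := ih t (out ++ ['d']) hlen
            simp only [List.map_cons, hg, hrc]
            simpa using hih
          by_cases h5 : c = '='
          · subst h5
            rw [loop_some n _ out "=" ["e"] (by rw [rev_items]; simp [tspeakFind, PySem.Chars.startswith, List.isPrefixOf]) rfl]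
            have hg : gmap '=' = 'e' := by decide
            have hrc : repC ('e' :: List.map gmap t) = 'e' :: repC (List.map gmap t) :=
              repC_cons _ _ (by rintro ⟨hx, -⟩; exact absurd hx (by decide))
            have hih := ih t (out ++ ['e']) hlen
            simp only [List.map_cons, hg, hrc]
            simpa using hih
          by_cases h6 : c = '_'
          · subst h6
            rw [loop_some n _ out "_" ["f"] (by rw [rev_items]; simp [tspeakFind, PySem.Chars.startswith, List.isPrefixOf]) rfl]
            have hg : gmap '_' = 'f' := by decide
            have hrc : repC ('f' :: List.map gmap t) = 'f' :: repC (List.map gmap t) :=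
              repC_cons _ _ (by rintro ⟨hx, -⟩; exact absurd hx (by decide))
            have hih := ih t (out ++ ['f']) hlen
            simp only [List.map_cons, hg, hrc]
            simpa using hih
          by_cases h7 : c = '-'
          · subst h7
            rw [loop_some n _ out "-" ["g"] (by rw [rev_items]; simp [tspeakFind, PySem.Chars.startswith, List.isPrefixOf]) rfl]
            have hg : gmap '-' = 'g' := by decide
            have hrc : repC ('g' :: List.map gmap t) = 'g' :: repC (List.map gmap t) :=
              repC_cons _ _ (by rintro ⟨hx, -⟩; exact absurd hx (by decide))
            have hih := ih t (out ++ ['g']) hlen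
            simp only [List.map_cons, hg, hrc]
            simpa using hih
          by_cases h8 : c = ')'
          · subst h8
            rw [loop_some n _ out ")" ["h"] (by rw [rev_items]; simp [tspeakFind, PySem.Chars.startswith, List.isPrefixOf]) rfl]
            have hg : gmap ')' = 'h' := by decide
            have hrc : repC ('h' :: List.map gmap t) = 'h' :: repC (List.map gmap t) :=
              repC_cons _ _ (by rintro ⟨hx, -⟩; exact absurd hx (by decide))
            have hih := ih t (out ++ ['h']) hlen
            simp only [List.map_cons, hg, hrc]
            simpa using hih
          by_cases h9 : c = '('
          · subst h9
            rw [loop_some n _ out "(" ["i"] (by rw [rev_items]; simp [tspeakFind, PySem.Chars.startswith, List.isPrefixOf]) rfl]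
            have hg : gmap '(' = 'i' := by decide
            have hrc : repC ('i' :: List.map gmap t) = 'i' :: repC (List.map gmap t) :=
              repC_cons _ _ (by rintro ⟨hx, -⟩; exact absurd hx (by decide))
            have hih := ih t (out ++ ['i']) hlen
            simp only [List.map_cons, hg, hrc]
            simpa using hih
          by_cases h10 : c = '\"'
          · subst h10
            rw [loop_some n _ out "\"" ["j"] (by rw [rev_items]; simp [tspeakFind, PySem.Chars.startswith, List.isPrefixOf]) rfl]
            have hg : gmap '\"' = 'j' := by decide
            have hrc : repC ('j' :: List.map gmap t) = 'j' :: repC (List.map gmap t) :=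
              repC_cons _ _ (by rintro ⟨hx, -⟩; exact absurd hx (by decide))
            have hih := ih t (out ++ ['j']) hlen
            simp only [List.map_cons, hg, hrc]
            simpa using hih
          by_cases h11 : c = '#'
          · subst h11
            rw [loop_some n _ out "#" ["k"] (by rw [rev_items]; simp [tspeakFind, PySem.Chars.startswith, List.isPrefixOf]) rfl]
            have hg : gmap '#' = 'k' := by decide
            have hrc : repC ('k' :: List.map gmap t) = 'k' :: repC (List.map gmap t) :=
              repC_cons _ _ (by rintro ⟨hx, -⟩; exact absurd hx (by decide))
            have hih := ih t (out ++ ['k']) hlen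
            simp only [List.map_cons, hg, hrc]
            simpa using hih
          by_cases h12 : c = '@'
          · subst h12
            rw [loop_some n _ out "@" ["l"] (by rw [rev_items]; simp [tspeakFind, PySem.Chars.startswith, List.isPrefixOf]) rfl]
            have hg : gmap '@' = 'l' := by decide
            have hrc : repC ('l' :: List.map gmap t) = 'l' :: repC (List.map gmap t) :=
              repC_cons _ _ (by rintro ⟨hx, -⟩; exact absurd hx (by decide))
            have hih := ih t (out ++ ['l']) hlen
            simp only [List.map_cons, hg, hrc]
            simpa using hih
          by_cases h13 : c = '!'
          · subst h13
            rw [loop_some n _ out "!" ["m"] (by rw [rev_items]; simp [tspeakFind, PySem.Chars.startswith, List.isPrefixOf]) rfl]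
            have hg : gmap '!' = 'm' := by decide
            have hrc : repC ('m' :: List.map gmap t) = 'm' :: repC (List.map gmap t) :=
              repC_cons _ _ (by rintro ⟨hx, -⟩; exact absurd hx (by decide))
            have hih := ih t (out ++ ['m']) hlen
            simp only [List.map_cons, hg, hrc]
            simpa using hih
          by_cases h14 : c = '~'
          · subst h14
            rw [loop_some n _ out "~" ["n"] (by rw [rev_items]; simp [tspeakFind, PySem.Chars.startswith, List.isPrefixOf]) rfl]
            have hg : gmap '~' = 'n' := by decide
            have hrc : repC ('n' :: List.map gmap t) = 'n' :: repC (List.map gmap t) :=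
              repC_cons _ _ (by rintro ⟨hx, -⟩; exact absurd hx (by decide))
            have hih := ih t (out ++ ['n']) hlen
            simp only [List.map_cons, hg, hrc]
            simpa using hih
          by_cases h15 : c = '`'
          · subst h15
            rw [loop_some n _ out "`" ["o"] (by rw [rev_items]; simp [tspeakFind, PySem.Chars.startswith, List.isPrefixOf]) rfl]
            have hg : gmap '`' = 'o' := by decide
            have hrc : repC ('o' :: List.map gmap t) = 'o' :: repC (List.map gmap t) :=
              repC_cons _ _ (by rintro ⟨hx, -⟩; exact absurd hx (by decide))
            have hih := ih t (out ++ ['o']) hlen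
            simp only [List.map_cons, hg, hrc]
            simpa using hih
          by_cases h16 : c = '*'
          · subst h16
            rw [loop_some n _ out "*" ["p"] (by rw [rev_items]; simp [tspeakFind, PySem.Chars.startswith, List.isPrefixOf]) rfl]
            have hg : gmap '*' = 'p' := by decide
            have hrc : repC ('p' :: List.map gmap t) = 'p' :: repC (List.map gmap t) :=
              repC_cons _ _ (by rintro ⟨hx, -⟩; exact absurd hx (by decide))
            have hih := ih t (out ++ ['p']) hlen
            simp only [List.map_cons, hg, hrc]
            simpa using hih
          by_cases h17 : c = '^'
          · subst h17
            rw [loop_some n _ out "^" ["q"] (by rw [rev_items]; simp [tspeakFind, PySem.Chars.startswith, List.isPrefixOf]) rfl]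
            have hg : gmap '^' = 'q' := by decide
            have hrc : repC ('q' :: List.map gmap t) = 'q' :: repC (List.map gmap t) :=
              repC_cons _ _ (by rintro ⟨hx, -⟩; exact absurd hx (by decide))
            have hih := ih t (out ++ ['q']) hlen
            simp only [List.map_cons, hg, hrc]
            simpa using hih
          by_cases h18 : c = '%'
          · subst h18
            rw [loop_some n _ out "%" ["r"] (by rw [rev_items]; simp [tspeakFind, PySem.Chars.startswith, List.isPrefixOf]) rfl]
            have hg : gmap '%' = 'r' := by decide
            have hrc : repC ('r' :: List.map gmap t) = 'r' :: repC (List.map gmap t) :=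
              repC_cons _ _ (by rintro ⟨hx, -⟩; exact absurd hx (by decide))
            have hih := ih t (out ++ ['r']) hlen
            simp only [List.map_cons, hg, hrc]
            simpa using hih
          by_cases h19 : c = '$'
          · subst h19
            rw [loop_some n _ out "$" ["s"] (by rw [rev_items]; simp [tspeakFind, PySem.Chars.startswith, List.isPrefixOf]) rfl]
            have hg : gmap '$' = 's' := by decide
            have hrc : repC ('s' :: List.map gmap t) = 's' :: repC (List.map gmap t) :=
              repC_cons _ _ (by rintro ⟨hx, -⟩; exact absurd hx (by decide))
            have hih := ih t (out ++ ['s']) hlen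
            simp only [List.map_cons, hg, hrc]
            simpa using hih
          by_cases h20 : c = '/'
          · subst h20
            rw [loop_some n _ out "/" ["t"] (by rw [rev_items]; simp [tspeakFind, PySem.Chars.startswith, List.isPrefixOf]) rfl]
            have hg : gmap '/' = 't' := by decide
            have hrc : repC ('t' :: List.map gmap t) = 't' :: repC (List.map gmap t) :=
              repC_cons _ _ (by rintro ⟨hx, -⟩; exact absurd hx (by decide))
            have hih := ih t (out ++ ['t']) hlen
            simp only [List.map_cons, hg, hrc]
            simpa using hih
          by_cases h21 : c = ']'
          · subst h21
            rw [loop_some n _ out "]" ["u"] (by rw [rev_items]; simp [tspeakFind, PySem.Chars.startswith, List.isPrefixOf]) rfl]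
            have hg : gmap ']' = 'u' := by decide
            have hrc : repC ('u' :: List.map gmap t) = 'u' :: repC (List.map gmap t) :=
              repC_cons _ _ (by rintro ⟨hx, -⟩; exact absurd hx (by decide))
            have hih := ih t (out ++ ['u']) hlen
            simp only [List.map_cons, hg, hrc]
            simpa using hih
          by_cases h22 : c = '['
          · subst h22
            rw [loop_some n _ out "[" ["v"] (by rw [rev_items]; simp [tspeakFind, PySem.Chars.startswith, List.isPrefixOf]) rfl]
            have hg : gmap '[' = 'v' := by decide
            have hrc : repC ('v' :: List.map gmap t) = 'v' :: repC (List.map gmap t) :=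
              repC_cons _ _ (by rintro ⟨hx, -⟩; exact absurd hx (by decide))
            have hih := ih t (out ++ ['v']) hlen
            simp only [List.map_cons, hg, hrc]
            simpa using hih
          by_cases h23 : c = '?'
          · subst h23
            rw [loop_some n _ out "?" ["w"] (by rw [rev_items]; simp [tspeakFind, PySem.Chars.startswith, List.isPrefixOf]) rfl]
            have hg : gmap '?' = 'w' := by decide
            have hrc : repC ('w' :: List.map gmap t) = 'w' :: repC (List.map gmap t) :=
              repC_cons _ _ (by rintro ⟨hx, -⟩; exact absurd hx (by decide))
            have hih := ih t (out ++ ['w']) hlen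
            simp only [List.map_cons, hg, hrc]
            simpa using hih
          by_cases h24 : c = '<'
          · subst h24
            rw [loop_some n _ out "<" ["x"] (by rw [rev_items]; simp [tspeakFind, PySem.Chars.startswith, List.isPrefixOf]) rfl]
            have hg : gmap '<' = 'x' := by decide
            have hrc : repC ('x' :: List.map gmap t) = 'x' :: repC (List.map gmap t) :=
              repC_cons _ _ (by rintro ⟨hx, -⟩; exact absurd hx (by decide))
            have hih := ih t (out ++ ['x']) hlen
            simp only [List.map_cons, hg, hrc]
            simpa using hih
          by_cases h25 : c = '>'
          · subst h25
            rw [loop_some n _ out ">" ["y"] (by rw [rev_items]; simp [tspeakFind, PySem.Chars.startswith, List.isPrefixOf]) rfl]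
            have hg : gmap '>' = 'y' := by decide
            have hrc : repC ('y' :: List.map gmap t) = 'y' :: repC (List.map gmap t) :=
              repC_cons _ _ (by rintro ⟨hx, -⟩; exact absurd hx (by decide))
            have hih := ih t (out ++ ['y']) hlen
            simp only [List.map_cons, hg, hrc]
            simpa using hih
          by_cases hcol : c = ':'
          · subst hcol
            cases t with
            | nil =>
                rw [loop_none n _ out (by rw [rev_items]; decide) rfl]
                have hih := ih [] (out ++ [':']) (by simp)
                have hg : gmap ':' = ':' := by decide
                simp only [List.map_cons, List.map_nil, hg]
                simpa [repC] using hih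
            | cons c2 t2 =>
                have hlen2 : t2.length ≤ n := by simp at hlen; omega
                by_cases h2 : c2 = ':'
                · subst h2
                  rw [loop_some n _ out "::" ["z"] (by rw [rev_items]; simp [tspeakFind, PySem.Chars.startswith, List.isPrefixOf]) rfl]
                  have hg : gmap ':' = ':' := by decide
                  have hrc : repC (':' :: ':' :: List.map gmap t2) = 'z' :: repC (List.map gmap t2) := by
                    rw [repC, if_pos ⟨rfl, rfl⟩]
                  have hih := ih t2 (out ++ ['z']) hlen2
                  simp only [List.map_cons, hg, hrc]
                  simpa using hih
                · rw [loop_none n _ out (by rw [rev_items]; simp [tspeakFind, PySem.Chars.startswith, List.isPrefixOf, Ne.symm h2]) rfl]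
                  have hg : gmap ':' = ':' := by decide
                  have hrc : repC (':' :: gmap c2 :: List.map gmap t2) = ':' :: repC (gmap c2 :: List.map gmap t2) := by
                    rw [repC, if_neg]
                    rintro ⟨-, hx⟩
                    exact h2 ((gmap_colon_iff c2).mp hx)
                  have hih := ih (c2 :: t2) (out ++ [':']) hlen
                  simp only [List.map_cons, hg, hrc]
                  simpa using hih
          · rw [loop_none n _ out (by rw [rev_items]; simp [tspeakFind, PySem.Chars.startswith, List.isPrefixOf, Ne.symm h1, Ne.symm h2, Ne.symm h3, Ne.symm h4, Ne.symm h5, Ne.symm h6, Ne.symm h7, Ne.symm h8, Ne.symm h9, Ne.symm h10, Ne.symm h11, Ne.symm h12, Ne.symm h13, Ne.symm h14, Ne.symm h15, Ne.symm h16, Ne.symm h17, Ne.symm h18, Ne.symm h19, Ne.symm h20, Ne.symm h21, Ne.symm h22, Ne.symm h23, Ne.symm h24, Ne.symm h25, Ne.symm hcol]) rfl]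
            have hg : gmap c = c := by simp [gmap, h1, h2, h3, h4, h5, h6, h7, h8, h9, h10, h11, h12, h13, h14, h15, h16, h17, h18, h19, h20, h21, h22, h23, h24, h25]
            have hrc : repC (c :: List.map gmap t) = c :: repC (List.map gmap t) :=
              repC_cons _ _ (by rintro ⟨hx, -⟩; exact hcol hx)
            have hih := ih t (out ++ [c]) hlen
            simp only [List.map_cons, hg, hrc]
            simpa using hih

-- ===== VERDICT (by name: the statement is the Claim_ definition above) =====
theorem tspeak_spec : Claim_equal_tspeak := by
  intro s _
  show tspeak s = tspeak_alt s
  unfold tspeak tspeak_alt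
  rw [loopA s.toList.length s.toList [] (le_refl _)]
  have h1 : PySem.Chars.replace s.toList "::".toList "z".toList = repC s.toList := by
    have : ("::" : String).toList = [':', ':'] := rfl
    rw [this]
    have hz : ("z" : String).toList = ['z'] := rfl
    rw [hz, colon_replace]
  rw [h1]
  have h2 : (repC s.toList).map (altTranslate altTable) = (repC s.toList).map gmap :=
    List.map_congr_left (fun a _ => translate_eq_gmap a)
  rw [h2, map_gmap_repC]
  rfl
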